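-- pv_equiv track=rewrite | github.com/Kahsolt/AmplitudeEncoding-DeepQuantum | p1/utils.py | snake_index_generator
-- ===== SOURCE A (Python) =====
-- from typing import List, Tuple, Dict, Generator
--
-- def snake_index_generator(N:int=28) -> Generator[Tuple[int, int], int, None]:
--     dir = 0     # 0: →, 1: ↓, 2: ←, 3: ↑
--     i, j = 0, -1
--     # the first stage only repeats once
--     steps_stage = N
--     steps_stage_repeat = 0
--     steps = steps_stage
--     # other stages will repeat twice
--     while steps_stage > 0:
--         if   dir == 0: j += 1
--         elif dir == 1: i += 1
--         elif dir == 2: j -= 1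
--         elif dir == 3: i -= 1
--         yield i, j
--         steps -= 1
--         # next repeat or stage?
--         if steps == 0:
--             if steps_stage_repeat == 1:
--                 steps_stage_repeat -= 1
--             else:
--                 steps_stage_repeat = 1
--                 steps_stage -= 1
--             steps = steps_stage
--             dir = (dir + 1) % 4
-- ===== SOURCE B (Python) =====
-- def snake_index_generator(N: int = 28):
--     top, bottom, left, right = 0, N - 1, 0, N - 1
--     while top <= bottom and left <= right:
--         for j in range(left, right + 1):
--             yield top, j
--         for i in range(top + 1, bottom + 1):
--             yield i, right
--         if top < bottom:
--             for j in range(right - 1, left - 1, -1):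
--                 yield bottom, j
--         if left < right:
--             for i in range(bottom - 1, top, -1):
--                 yield i, left
--         top += 1; bottom -= 1; left += 1; right -= 1
-- ===== Notes on version B (the rewrite author's own statement) =====
-- stated objective: simpler
-- what changed: Replaces A's one-cell-at-a-time direction/stage/repeat state machine by the standard four-boundary (top/bottom/left/right) spiral loop that emits a whole row or column per range loop.
import Mathlib
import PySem

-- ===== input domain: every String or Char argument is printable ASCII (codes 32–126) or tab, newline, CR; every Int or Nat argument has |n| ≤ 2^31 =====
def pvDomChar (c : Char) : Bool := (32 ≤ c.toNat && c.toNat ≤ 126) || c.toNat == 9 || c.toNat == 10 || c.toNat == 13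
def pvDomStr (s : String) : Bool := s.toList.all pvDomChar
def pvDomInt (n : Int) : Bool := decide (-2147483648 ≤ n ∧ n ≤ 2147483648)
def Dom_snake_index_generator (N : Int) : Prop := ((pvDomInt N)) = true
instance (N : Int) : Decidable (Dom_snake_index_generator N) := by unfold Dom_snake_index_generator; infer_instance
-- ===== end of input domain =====

-- B replaces A's direction/stage/repeat state machine by the standard four-boundary
-- (top/bottom/left/right) spiral loop: a plainer decomposition, same O(N^2) output cost.

-- B replaces A's direction/stage/repeat state machine by the standard four-boundary
-- (top/bottom/left/right) spiral loop: a plainer decomposition, same output cost.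

-- ===== PORT A =====
-- A's while-loop as structural recursion on fuel; fuel N.toNat*N.toNat is the exact
-- number of iterations A's loop performs (a totality guard only; it changes no value).
-- aMove is the dir-branch at the top of the loop body, branches in Python's order.
def aMove (dir i j : Int) : Int × Int :=
  if dir = 0 then (i, j + 1)
  else if dir = 1 then (i + 1, j)
  else if dir = 2 then (i, j - 1)
  else (i - 1, j)

def aLoop : Nat → Int → Int → Int → Int → Int → Int → List (Int × Int)
  | 0, _, _, _, _, _, _ => []
  | fuel + 1, dir, i, j, steps_stage, steps_stage_repeat, steps =>
    if steps_stage > 0 then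
      let p := aMove dir i j
      let steps' := steps - 1
      if steps' = 0 then
        let sr := if steps_stage_repeat = 1 then (steps_stage, steps_stage_repeat - 1)
                  else (steps_stage - 1, (1 : Int))
        p :: aLoop fuel (PySem.Int.mod (dir + 1) 4) p.1 p.2 sr.1 sr.2 sr.1
      else
        p :: aLoop fuel dir p.1 p.2 steps_stage steps_stage_repeat steps'
    else []

def snake_index_generator (N : Int) : List (Int × Int) :=
  aLoop (N.toNat * N.toNat) 0 0 (-1) N 0 N

-- ===== PORT B =====
-- Source B's boundary loop; each `for … in range(…)` is a map over PySem.List.pyRange.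
def bLoop (top bottom left right : Int) : List (Int × Int) :=
  if _h : top ≤ bottom ∧ left ≤ right then
    ((PySem.List.pyRange left (right + 1) 1).map (fun j => (top, j)))
    ++ ((PySem.List.pyRange (top + 1) (bottom + 1) 1).map (fun i => (i, right)))
    ++ (if top < bottom then (PySem.List.pyRange (right - 1) (left - 1) (-1)).map (fun j => (bottom, j)) else [])
    ++ (if left < right then (PySem.List.pyRange (bottom - 1) top (-1)).map (fun i => (i, left)) else [])
    ++ bLoop (top + 1) (bottom - 1) (left + 1) (right - 1)
  else []
termination_by (bottom + 1 - top).toNat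
decreasing_by omega

def snake_index_generator_alt (N : Int) : List (Int × Int) :=
  bLoop 0 (N - 1) 0 (N - 1)

-- ===== PRECONDITION & SPEC =====
def Spec_snake_index_generator (N : Int) (out : List (Int × Int)) : Prop := out = snake_index_generator_alt N
instance (N : Int) (out : List (Int × Int)) : Decidable (Spec_snake_index_generator N out) := by unfold Spec_snake_index_generator; infer_instance

-- ===== CLAIM (what is proved, stated in full; the proofs are below) =====
def Claim_equal_snake_index_generator : Prop := ∀ (N : Int), Dom_snake_index_generator N → Spec_snake_index_generator N (snake_index_generator N)

-- ===== LEMMAS AND PROOFS =====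

lemma aLoop_succ (fuel : Nat) (dir i j stage rep steps : Int) :
    aLoop (fuel + 1) dir i j stage rep steps =
      if stage > 0 then
        (if steps - 1 = 0 then
          (aMove dir i j) :: aLoop fuel (PySem.Int.mod (dir + 1) 4) (aMove dir i j).1 (aMove dir i j).2
            (if rep = 1 then stage else stage - 1) (if rep = 1 then rep - 1 else 1)
            (if rep = 1 then stage else stage - 1)
        else
          (aMove dir i j) :: aLoop fuel dir (aMove dir i j).1 (aMove dir i j).2 stage rep (steps - 1))
      else [] := by
  show (if stage > 0 then _ else []) = _
  by_cases hs : stage > 0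
  · rw [if_pos hs, if_pos hs]
    by_cases hst : steps - 1 = 0
    · rw [if_pos hst, if_pos hst]
      by_cases hr : rep = 1 <;> simp [hr]
    · rw [if_neg hst, if_neg hst]
  · rw [if_neg hs, if_neg hs]

def iterMv (dir i j : Int) (n : Nat) : Int × Int :=
  if dir = 0 then (i, j + n)
  else if dir = 1 then (i + n, j)
  else if dir = 2 then (i, j - n)
  else (i - n, j)

lemma aMove_iterMv (dir i j : Int) (n : Nat) :
    aMove dir (iterMv dir i j n).1 (iterMv dir i j n).2 = iterMv dir i j (n + 1) := by
  simp only [aMove, iterMv]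
  split_ifs <;> simp [Prod.ext_iff] <;> omega

lemma iterMv_comp (dir i j : Int) (n k : Nat) :
    iterMv dir (iterMv dir i j n).1 (iterMv dir i j n).2 k = iterMv dir i j (n + k) := by
  simp only [iterMv]
  split_ifs <;> simp [Prod.ext_iff] <;> omega

lemma range_map_shift (dir i j : Int) (m : Nat) :
    (List.range (m + 1)).map (fun k => iterMv dir i j (k + 1)) =
      iterMv dir i j 1 ::
        (List.range m).map (fun k => iterMv dir (iterMv dir i j 1).1 (iterMv dir i j 1).2 (k + 1)) := by
  rw [List.range_succ_eq_map, List.map_cons, List.map_map]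
  congr 1
  apply List.map_congr_left
  intro k _
  simp only [Function.comp_apply]
  rw [iterMv_comp dir i j 1 (k + 1), show 1 + (k + 1) = k + 1 + 1 from by omega]

lemma aLoop_run (dir : Int) : ∀ (m fuel : Nat) (i j stage rep : Int), 0 < stage →
    aLoop (m + 1 + fuel) dir i j stage rep ((m : Int) + 1) =
      (List.range (m + 1)).map (fun k => iterMv dir i j (k + 1))
        ++ aLoop fuel (PySem.Int.mod (dir + 1) 4)
             (iterMv dir i j (m + 1)).1 (iterMv dir i j (m + 1)).2
             (if rep = 1 then stage else stage - 1)
             (if rep = 1 then rep - 1 else 1)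
             (if rep = 1 then stage else stage - 1) := by
  intro m
  induction m with
  | zero =>
    intro fuel i j stage rep hs
    have h1 : aMove dir i j = iterMv dir i j 1 := by
      simpa [iterMv] using aMove_iterMv dir i j 0
    rw [show 0 + 1 + fuel = fuel + 1 from by omega, aLoop_succ, if_pos hs]
    push_cast
    simp [List.range_succ, h1]
  | succ m ih =>
    intro fuel i j stage rep hs
    rw [show m + 1 + 1 + fuel = (m + 1 + fuel) + 1 from by omega, aLoop_succ, if_pos hs]
    push_cast
    rw [if_neg (by omega : ¬((m : Int) + 1 + 1 - 1 = 0)),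
        show ((m:Int) + 1 + 1) - 1 = (m : Int) + 1 from by ring]
    have h1 : aMove dir i j = iterMv dir i j 1 := by
      simpa [iterMv] using aMove_iterMv dir i j 0
    rw [h1, ih fuel (iterMv dir i j 1).1 (iterMv dir i j 1).2 stage rep hs,
        iterMv_comp dir i j 1 (m + 1), show 1 + (m + 1) = m + 1 + 1 from by omega]
    conv_rhs => rw [range_map_shift dir i j (m + 1)]
    rw [List.cons_append]

lemma layer : ∀ s : Nat, ∀ t l : Int,
    aLoop (s * s) 0 t (l - 1) (s : Int) 0 (s : Int) = bLoop t (t + s - 1) l (l + s - 1) := by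
  intro s
  induction s using Nat.strong_induction_on with
  | _ s ih =>
    match s with
    | 0 =>
      intro t l
      rw [bLoop]
      norm_num [aLoop]
    | 1 =>
      intro t l
      have e := aLoop_run 0 0 0 t (l - 1) 1 0 (by norm_num)
      norm_num at e ⊢
      rw [e]
      rw [bLoop, dif_pos ⟨le_refl t, le_refl l⟩, bLoop, dif_neg (by omega : ¬(t + 1 ≤ t - 1 ∧ l + 1 ≤ l - 1))]
      simp [iterMv, aLoop, PySem.List.pyRange_one_singleton, PySem.List.pyRange_one_eq_nil le_rfl]
    | (k+2) =>
      intro t l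
      rw [show (k+2)*(k+2) = (k+1)+1+(k*k+3*k+2) from by ring]
      have e1 := aLoop_run 0 (k+1) (k*k+3*k+2) t (l - 1) (↑(k+2)) 0 (by positivity)
      norm_num at e1 ⊢
      rw [show ((k:Int)+1+1) = (k:Int)+2 from by ring, show ((k:Int)+2-1) = (k:Int)+1 from by ring,
          show iterMv 0 t (l - 1) (k + 1 + 1) = (t, l+(k:Int)+1) from by simp [iterMv, Prod.ext_iff]; omega] at e1
      norm_num at e1
      rw [e1]
      -- run 2 (down the right column, k+1 steps)
      have e2 := aLoop_run 1 k (k*k+2*k+1) t (l+(k:Int)+1) ((k:Int)+1) 1 (by positivity)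
      norm_num at e2
      rw [show iterMv 1 t (l+(k:Int)+1) (k+1) = (t+(k:Int)+1, l+(k:Int)+1) from by simp [iterMv, Prod.ext_iff]; omega] at e2
      norm_num at e2
      rw [show k*k+3*k+2 = k+1+(k*k+2*k+1) from by ring, e2]
      -- run 3 (leftwards along the bottom row, k+1 steps)
      have e3 := aLoop_run 2 k (k*k+k) (t+(k:Int)+1) (l+(k:Int)+1) ((k:Int)+1) 0 (by positivity)
      norm_num at e3
      rw [show iterMv 2 (t+(k:Int)+1) (l+(k:Int)+1) (k+1) = (t+(k:Int)+1, l) from by simp [iterMv]] at e3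
      norm_num at e3
      rw [show k*k+2*k+1 = k+1+(k*k+k) from by ring, e3]
      -- run 4 (up the left column, k steps; for k = 0 the loop has already ended)
      have e4 : aLoop (k*k+k) 3 (t+(k:Int)+1) l (k:Int) 1 (k:Int) =
          (List.range k).map (fun q => iterMv 3 (t+(k:Int)+1) l (q+1)) ++ aLoop (k*k) 0 (t+1) l (k:Int) 0 (k:Int) := by
        cases k with
        | zero => simp [aLoop]
        | succ k' =>
          have e := aLoop_run 3 k' (k'*k'+2*k'+1) (t+(k':Int)+2) l ((k':Int)+1) 1 (by positivity)
          norm_num at e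
          rw [show iterMv 3 (t+(k':Int)+2) l (k'+1) = (t+1, l) from by simp [iterMv, Prod.ext_iff]; omega] at e
          norm_num at e
          push_cast
          rw [show (k'+1)*(k'+1)+(k'+1) = k'+1+(k'*k'+2*k'+1) from by ring,
              show t+((k':Int)+1)+1 = t+(k':Int)+2 from by ring, e,
              show k'*k'+2*k'+1 = (k'+1)*(k'+1) from by ring]
      rw [e4]
      have hrec := ih k (by omega) (t+1) (l+1)
      norm_num at hrec
      rw [hrec]
      conv_rhs => rw [bLoop]
      rw [dif_pos (by constructor <;> omega : t ≤ t + ((k:Int) + 2) - 1 ∧ l ≤ l + ((k:Int) + 2) - 1)]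
      rw [if_pos (by omega : t < t + ((k:Int) + 2) - 1), if_pos (by omega : l < l + ((k:Int) + 2) - 1)]
      rw [show l + ((k:Int)+2) - 1 + 1 = l + (k:Int) + 2 from by ring,
          show t + ((k:Int)+2) - 1 + 1 = t + (k:Int) + 2 from by ring,
          show l + ((k:Int)+2) - 1 - 1 = l + (k:Int) from by ring,
          show t + ((k:Int)+2) - 1 - 1 = t + (k:Int) from by ring,
          show l + ((k:Int)+2) - 1 = l + (k:Int) + 1 from by ring,
          show t + ((k:Int)+2) - 1 = t + (k:Int) + 1 from by ring,
          show t + 1 + (k:Int) - 1 = t + (k:Int) from by ring,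
          show l + 1 + (k:Int) - 1 = l + (k:Int) from by ring]
      simp only [List.append_assoc]
      congr 1
      · rw [PySem.List.pyRange_one, show (l + (k:Int) + 2 - l).toNat = k + 1 + 1 from by omega, List.map_map]
        apply List.map_congr_left
        intro q hq
        simp [iterMv]
        try omega
      congr 1
      · rw [PySem.List.pyRange_one, show (t + (k:Int) + 2 - (t+1)).toNat = k + 1 from by omega, List.map_map]
        apply List.map_congr_left
        intro q hq
        simp [iterMv]
        try omega
      congr 1
      · rw [PySem.List.pyRange_neg_one, show (l + (k:Int) - (l - 1)).toNat = k + 1 from by omega, List.map_map]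
        apply List.map_congr_left
        intro q hq
        simp [iterMv]
        try omega
      congr 1
      · rw [PySem.List.pyRange_neg_one, show (t + (k:Int) - t).toNat = k from by omega, List.map_map]
        apply List.map_congr_left
        intro q hq
        simp [iterMv]
        try omega
-- ===== VERDICT (by name: the statement is the Claim_ definition above) =====
theorem snake_index_generator_spec : Claim_equal_snake_index_generator := by
  intro N _
  unfold Spec_snake_index_generator snake_index_generator snake_index_generator_alt
  by_cases hN : N ≤ 0
  · rw [show N.toNat = 0 from by omega]
    rw [bLoop, dif_neg (by omega : ¬((0:Int) ≤ N - 1 ∧ (0:Int) ≤ N - 1))]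
    simp [aLoop]
  · have hNs : ((N.toNat : Int)) = N := Int.toNat_of_nonneg (by omega)
    have h := layer N.toNat 0 0
    norm_num [hNs] at h
    rw [← hNs]
    convert h using 2 <;> omega
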